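-- pv_equiv track=rewrite | github.com/mapi100/math_project | app.py | find_closest_prime
-- ===== SOURCE A (Python) =====
-- def is_prime(n):
--     if n < 2:
--         return False
--     if n == 2:
--         return True
--     if n % 2 == 0:
--         return False
--     for i in range(3, int(n ** 0.5) + 1, 2):
--         if n % i == 0:
--             return False
--     return True
--
-- def find_closest_prime(n):
--     if is_prime(n):
--         return n
--
--     if n % 2 == 0:
--         lower = n - 1
--         upper = n + 1
--     else:
--         lower = n - 2
--         upper = n + 2
--
--     while True:
--         if is_prime(lower):
--             return lower
--         elif is_prime(upper):
--             return upper
--         lower -= 2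
--         upper += 2
-- ===== SOURCE B (Python) =====
-- def is_prime(n):
--     if n < 2:
--         return False
--     if n == 2:
--         return True
--     if n % 2 == 0:
--         return False
--     for i in range(3, int(n ** 0.5) + 1, 2):
--         if n % i == 0:
--             return False
--     return True
--
-- def find_closest_prime(n):
--     if is_prime(n):
--         return n
--     if n % 2 == 0:
--         lo, hi = n - 1, n + 1
--     else:
--         lo, hi = n - 2, n + 2
--     # bounded downward parity-preserving search for the nearest smaller prime
--     while lo >= 2 and not is_prime(lo):
--         lo -= 2
--     # unbounded upward parity-preserving search (hi is always odd, so it terminates)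
--     while not is_prime(hi):
--         hi += 2
--     if lo >= 2 and n - lo <= hi - n:
--         return lo
--     return hi
-- ===== Notes on version B (the rewrite author's own statement) =====
-- stated objective: alternative
-- what changed: A's single interleaved while-True loop that steps lower and upper together is replaced by two independent parity-preserving searches (a bounded downward scan and an upward scan) whose results are combined by an explicit distance comparison that preserves A's tie-favors-lower rule.
import Mathlib
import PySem

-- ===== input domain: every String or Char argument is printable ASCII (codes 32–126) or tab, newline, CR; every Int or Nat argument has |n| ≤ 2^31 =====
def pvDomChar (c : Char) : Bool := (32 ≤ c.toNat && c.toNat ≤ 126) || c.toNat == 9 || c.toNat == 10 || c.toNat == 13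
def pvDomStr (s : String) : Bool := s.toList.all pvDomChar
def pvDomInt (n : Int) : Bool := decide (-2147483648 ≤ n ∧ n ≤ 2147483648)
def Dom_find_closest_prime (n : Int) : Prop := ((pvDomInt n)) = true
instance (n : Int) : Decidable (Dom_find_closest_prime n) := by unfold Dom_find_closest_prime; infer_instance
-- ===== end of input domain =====

-- B replaces A's single interleaved two-sided loop by two independent parity-preserving
-- searches (a bounded downward one and an upward one) followed by a distance comparison;
-- objective: alternative decomposition, same exact values.

-- fuel bound for the upward searches: large enough on the whole domain (see pvFuel_ok)
def pvFuel : Nat := 2147483648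

-- shared helper: literal port of is_prime; int(n ** 0.5) is ported as Nat.sqrt,
-- exact on the domain |n| ≤ 2^31 where float pow is floor-exact
def pvIsPrime (n : Int) : Bool :=
  if n < 2 then false
  else if n == 2 then true
  else if PySem.Int.mod n 2 == 0 then false
  else !(PySem.List.pyRange 3 ((n.toNat.sqrt : Int) + 1) 2).any (fun i => PySem.Int.mod n i == 0)

-- ===== PORT A =====
-- the 'while True' loop; fuel 0 is never reached on the domain (see pvFuel_ok)
def pvLoopA : Int → Int → Nat → Int
  | _, _, 0 => 0
  | l, u, f+1 =>
    if pvIsPrime l then l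
    else if pvIsPrime u then u
    else pvLoopA (l - 2) (u + 2) f

def find_closest_prime (n : Int) : Int :=
  if pvIsPrime n then n
  else if PySem.Int.mod n 2 == 0 then pvLoopA (n - 1) (n + 1) pvFuel
  else pvLoopA (n - 2) (n + 2) pvFuel

-- ===== PORT B =====
-- downward search: 'while lo >= 2 and not is_prime(lo): lo -= 2'  (structurally bounded)
def pvDown (lo : Int) : Int :=
  if h : 2 ≤ lo ∧ pvIsPrime lo = false then pvDown (lo - 2) else lo
termination_by lo.toNat
decreasing_by omega

-- upward search: 'while not is_prime(hi): hi += 2'  (fuel is only a totality guard)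
def pvUp : Int → Nat → Int
  | hi, 0 => hi
  | hi, f+1 => if pvIsPrime hi then hi else pvUp (hi + 2) f

def find_closest_prime_alt (n : Int) : Int :=
  if pvIsPrime n then n
  else
    let lo0 := if PySem.Int.mod n 2 == 0 then n - 1 else n - 2
    let hi0 := if PySem.Int.mod n 2 == 0 then n + 1 else n + 2
    let lo := pvDown lo0
    let hi := pvUp hi0 pvFuel
    if 2 ≤ lo ∧ n - lo ≤ hi - n then lo else hi

-- ===== PRECONDITION & SPEC =====
def Spec_find_closest_prime (n : Int) (out : Int) : Prop := out = find_closest_prime_alt n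
instance (n : Int) (out : Int) : Decidable (Spec_find_closest_prime n out) := by unfold Spec_find_closest_prime; infer_instance

-- ===== CLAIM (what is proved, stated in full; the proofs are below) =====
def Claim_equal_find_closest_prime : Prop := ∀ (n : Int), Dom_find_closest_prime n → Spec_find_closest_prime n (find_closest_prime n)

-- ===== LEMMAS AND PROOFS =====

lemma pvIsPrime_ge_two {l : Int} (h : pvIsPrime l = true) : 2 ≤ l := by
  unfold pvIsPrime at h
  split_ifs at h <;> omega

lemma pvUp_ge : ∀ (f : Nat) (hi : Int), hi ≤ pvUp hi f := by
  intro f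
  induction f with
  | zero => intro hi; simp [pvUp]
  | succ f ih =>
    intro hi
    rw [pvUp]
    split
    · exact le_refl _
    · have := ih (hi + 2); omega

lemma pvDown_le (lo : Int) : pvDown lo ≤ lo := by
  induction lo using pvDown.induct with
  | case1 lo h ih => rw [pvDown, dif_pos h]; omega
  | case2 lo h => rw [pvDown, dif_neg h]

lemma pvLoopA_eq : ∀ (f : Nat) (l u : Int),
    (∃ k : Nat, k < f ∧ pvIsPrime (u + 2 * k) = true) →
    pvLoopA l u f =
      (if 2 ≤ pvDown l ∧ l - pvDown l ≤ pvUp u f - u then pvDown l else pvUp u f) := by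
  intro f
  induction f with
  | zero => intro l u ⟨k, hk, _⟩; omega
  | succ f ih =>
    intro l u ⟨k, hk, hpk⟩
    by_cases hl : pvIsPrime l = true
    · have hDl : pvDown l = l := by rw [pvDown]; simp [hl]
      have h2 : 2 ≤ l := pvIsPrime_ge_two hl
      have hU := pvUp_ge (f + 1) u
      rw [pvLoopA]
      simp only [hl, if_pos, hDl]
      rw [if_pos ⟨h2, by omega⟩]
    · by_cases hu : pvIsPrime u = true
      · have hU : pvUp u (f + 1) = u := by rw [pvUp]; simp [hu]
        rw [pvLoopA]
        simp only [hl, hu, if_neg, if_pos, Bool.false_eq_true, if_false, if_true]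
        rw [hU]
        by_cases h2 : 2 ≤ l
        · have hDl : pvDown l = pvDown (l - 2) := by
            rw [pvDown]; simp [h2, Bool.eq_false_iff.mpr hl, eq_false_of_ne_true hl]
          have := pvDown_le (l - 2)
          rw [if_neg]
          rintro ⟨hc1, hc2⟩
          omega
        · have hDl : pvDown l = l := by rw [pvDown]; simp [h2]
          rw [if_neg]
          rintro ⟨hc1, _⟩
          omega
      · -- step case
        have hk0 : k ≠ 0 := by
          rintro rfl
          simp at hpk
          exact hu (by simpa using hpk)
        obtain ⟨k', rfl⟩ := Nat.exists_eq_succ_of_ne_zero hk0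
        have hsuff : ∃ m : Nat, m < f ∧ pvIsPrime ((u + 2) + 2 * m) = true := by
          refine ⟨k', by omega, ?_⟩
          have : (u + 2) + 2 * (k' : Int) = u + 2 * ((k' + 1 : Nat) : Int) := by push_cast; ring
          rw [this]; exact hpk
        have hIH := ih (l - 2) (u + 2) hsuff
        have hU : pvUp u (f + 1) = pvUp (u + 2) f := by
          rw [pvUp]; simp [hu]
        rw [pvLoopA]
        simp only [hl, hu, Bool.false_eq_true, if_false]
        rw [hIH, hU]
        by_cases h2 : 2 ≤ l
        · have hDl : pvDown l = pvDown (l - 2) := by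
            rw [pvDown]; simp [h2, eq_false_of_ne_true hl]
          rw [hDl]
          have hiff : (2 ≤ pvDown (l - 2) ∧ l - 2 - pvDown (l - 2) ≤ pvUp (u + 2) f - (u + 2)) ↔
              (2 ≤ pvDown (l - 2) ∧ l - pvDown (l - 2) ≤ pvUp (u + 2) f - u) := by
            constructor <;> (rintro ⟨a, b⟩; exact ⟨a, by omega⟩)
          rw [if_congr hiff rfl rfl]
        · have hDl : pvDown l = l := by rw [pvDown]; simp [h2]
          have hD2 : pvDown (l - 2) = l - 2 := by
            rw [pvDown]; exact dif_neg (by rintro ⟨a, _⟩; omega)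
          rw [hDl, hD2, if_neg (by omega), if_neg (by rintro ⟨a, _⟩; omega)]

lemma pv_prime_isPrime (p : Nat) (hp : p.Prime) : pvIsPrime (p : Int) = true := by
  have h2 : 2 ≤ p := hp.two_le
  unfold pvIsPrime
  rw [if_neg (by exact_mod_cast Nat.not_lt.mpr h2)]
  by_cases hp2 : p = 2
  · subst hp2; simp
  · rw [if_neg (by simp; exact_mod_cast hp2)]
    have hodd : ¬ (2 ∣ p) := fun hd => hp2 ((Nat.Prime.eq_one_or_self_of_dvd hp 2 hd).resolve_left (by omega)).symm
    rw [if_neg]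
    · simp only [Bool.not_eq_true', List.any_eq_false]
      intro i hi
      have hmem := (PySem.List.mem_pyRange_iff_of_pos (by omega : (0:Int) < 2) i).mp hi
      obtain ⟨hi3, hilt, _⟩ := hmem
      simp only [beq_eq_false_iff_ne, ne_eq]
      intro hmod
      have hdvd : i ∣ (p : Int) := (PySem.Int.mod_eq_zero_iff_dvd _ _).mp (by simpa using hmod)
      have hin : (i.toNat : Int) = i := Int.toNat_of_nonneg (by omega)
      have hdvdN : i.toNat ∣ p := by
        rw [← Int.natCast_dvd_natCast, hin]; exact hdvd
      have hsq : (p : Int).toNat = p := by simp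
      rw [hsq] at hilt
      have hle : i.toNat ≤ p.sqrt := by omega
      have hlt : p.sqrt < p := Nat.sqrt_lt_self (by omega)
      rcases Nat.Prime.eq_one_or_self_of_dvd hp _ hdvdN with h1 | hself <;> omega
    · simp only [beq_iff_eq]
      intro hm
      exact hodd (by exact_mod_cast (PySem.Int.mod_eq_zero_iff_dvd _ _).mp hm)

lemma pvFuel_ok (u : Int) (hodd : ¬ (2 ∣ u)) (hlo : -2147483648 ≤ u) (hhi : u ≤ 2147483650) :
    ∃ k : Nat, k < pvFuel ∧ pvIsPrime (u + 2 * k) = true := by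
  by_cases hu3 : u ≤ 3
  · refine ⟨((3 - u) / 2).toNat, by unfold pvFuel; omega, ?_⟩
    have h3 : u + 2 * (((3 - u) / 2).toNat : Int) = 3 := by omega
    rw [h3]
    exact pv_prime_isPrime 3 (by norm_num)
  · obtain ⟨p, hp, hmp, hp2m⟩ := Nat.exists_prime_lt_and_le_two_mul u.toNat (by omega)
    have hpodd : ¬ (2 ∣ p) := fun hd =>
      (by omega : ¬ (2 : Nat) = p) (((Nat.Prime.eq_one_or_self_of_dvd hp 2 hd).resolve_left (by omega)))
    refine ⟨(p - u.toNat) / 2, by unfold pvFuel; omega, ?_⟩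
    have hN : ¬ (2 ∣ u.toNat) := by omega
    have heq : u + 2 * (((p - u.toNat) / 2 : Nat) : Int) = (p : Int) := by
      push_cast; omega
    rw [heq]
    exact pv_prime_isPrime p hp

-- ===== VERDICT (by name: the statement is the Claim_ definition above) =====
theorem find_closest_prime_spec : Claim_equal_find_closest_prime := by
  intro n hdom
  unfold Dom_find_closest_prime pvDomInt at hdom
  simp only [decide_eq_true_eq] at hdom
  unfold Spec_find_closest_prime find_closest_prime find_closest_prime_alt
  by_cases hn : pvIsPrime n = true
  · simp [hn]
  · simp only [hn, Bool.false_eq_true, if_false]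
    by_cases hpar : (PySem.Int.mod n 2 == 0) = true
    · have hdvd : (2:Int) ∣ n := (PySem.Int.mod_eq_zero_iff_dvd _ _).mp (by simpa using hpar)
      have hodd : ¬ ((2:Int) ∣ (n + 1)) := by omega
      have hs := pvFuel_ok (n + 1) hodd (by omega) (by omega)
      simp only [hpar, if_true]
      rw [pvLoopA_eq pvFuel (n - 1) (n + 1) hs]
      have hiff : (2 ≤ pvDown (n - 1) ∧ (n - 1) - pvDown (n - 1) ≤ pvUp (n + 1) pvFuel - (n + 1)) ↔
          (2 ≤ pvDown (n - 1) ∧ n - pvDown (n - 1) ≤ pvUp (n + 1) pvFuel - n) := by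
        constructor <;> (rintro ⟨a, b⟩; exact ⟨a, by omega⟩)
      rw [if_congr hiff rfl rfl]
    · have hnd : ¬ ((2:Int) ∣ n) := fun hd => by
        have hm : PySem.Int.mod n 2 = 0 := (PySem.Int.mod_eq_zero_iff_dvd n 2).mpr hd
        exact hpar (by rw [hm]; rfl)
      have hodd : ¬ ((2:Int) ∣ (n + 2)) := by omega
      have hs := pvFuel_ok (n + 2) hodd (by omega) (by omega)
      simp only [hpar, Bool.false_eq_true, if_false]
      rw [pvLoopA_eq pvFuel (n - 2) (n + 2) hs]
      have hiff : (2 ≤ pvDown (n - 2) ∧ (n - 2) - pvDown (n - 2) ≤ pvUp (n + 2) pvFuel - (n + 2)) ↔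
          (2 ≤ pvDown (n - 2) ∧ n - pvDown (n - 2) ≤ pvUp (n + 2) pvFuel - n) := by
        constructor <;> (rintro ⟨a, b⟩; exact ⟨a, by omega⟩)
      rw [if_congr hiff rfl rfl]
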